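-- pv_equiv track=rewrite | github.com/Jo-Jo98/ciguard | src/ciguard/parser/jenkinsfile.py | _strip_groovy_comments
-- ===== SOURCE A (Python) =====
-- def _strip_groovy_comments(src: str) -> str:
--     """Remove `//` line comments and `/* */` block comments without touching
--     comment-like text inside string literals. Returns a string of the same
--     length (comments replaced with spaces) so that any byte offset still
--     aligns with the original source — useful for future diagnostics."""
--     out = []
--     i = 0
--     n = len(src)
--     while i < n:
--         c = src[i]
--         # Triple-quoted strings (Groovy supports both ''' and """)
--         if c in ("'", '"') and i + 2 < n and src[i + 1] == c and src[i + 2] == c: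
--             quote = c * 3
--             end = src.find(quote, i + 3)
--             if end == -1:
--                 out.append(src[i:])
--                 break
--             out.append(src[i:end + 3])
--             i = end + 3
--             continue
--         # Single-line strings (handle escapes)
--         if c in ("'", '"'):
--             j = i + 1
--             while j < n:
--                 if src[j] == "\\" and j + 1 < n:
--                     j += 2
--                     continue
--                 if src[j] == c:
--                     j += 1
--                     break
--                 j += 1
--             out.append(src[i:j])
--             i = j
--             continue
--         # Line comment
--         if c == "/" and i + 1 < n and src[i + 1] == "/":
--             j = src.find("\n", i)
--             if j == -1:
--                 j = n
--             out.append(" " * (j - i))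
--             i = j
--             continue
--         # Block comment
--         if c == "/" and i + 1 < n and src[i + 1] == "*":
--             j = src.find("*/", i + 2)
--             if j == -1:
--                 # unterminated — drop the rest
--                 out.append(" " * (n - i))
--                 break
--             out.append(" " * (j + 2 - i))
--             i = j + 2
--             continue
--         out.append(c)
--         i += 1
--     return "".join(out)
-- ===== SOURCE B (Python) =====
-- def _strip_groovy_comments(src: str) -> str:
--     """Single-pass state machine: emits each character immediately (verbatim in
--     code and string literals, a space per comment character), instead of
--     index jumps with str.find and slicing."""
--     NORM, SLASH, Q1, INSTR, ESC, Q2, TRIPLE, LINE, BLK = range(9)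
--     out = []
--     state = NORM
--     q = ''        # active quote char
--     run = 0       # consecutive quotes seen inside a triple string
--     star = False  # previous block-comment char was '*'
--
--     def norm_char(c):
--         nonlocal state, q
--         if c == "'" or c == '"':
--             state, q = Q1, c
--             out.append(c)
--         elif c == '/':
--             state = SLASH
--         else:
--             state = NORM
--             out.append(c)
--
--     for c in src:
--         if state == NORM:
--             norm_char(c)
--         elif state == SLASH:
--             if c == '/':
--                 state = LINE
--                 out.append('  ')
--             elif c == '*':
--                 state, star = BLK, False
--                 out.append('  ')
--             else:
--                 out.append('/')
--                 norm_char(c)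
--         elif state == Q1:
--             out.append(c)
--             if c == q:
--                 state = Q2
--             elif c == '\\':
--                 state = ESC
--             else:
--                 state = INSTR
--         elif state == INSTR:
--             out.append(c)
--             if c == q:
--                 state = NORM
--             elif c == '\\':
--                 state = ESC
--         elif state == ESC:
--             out.append(c)
--             state = INSTR
--         elif state == Q2:
--             if c == q:
--                 state, run = TRIPLE, 0
--                 out.append(c)
--             else:
--                 norm_char(c)
--         elif state == TRIPLE:
--             out.append(c)
--             if c == q:
--                 if run == 2:
--                     state = NORM
--                 else:
--                     run += 1
--             else:
--                 run = 0
--         elif state == LINE: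
--             if c == '\n':
--                 state = NORM
--                 out.append('\n')
--             else:
--                 out.append(' ')
--         else:  # BLK
--             out.append(' ')
--             if star and c == '/':
--                 state = NORM
--             else:
--                 star = (c == '*')
--     if state == SLASH:
--         out.append('/')
--     return ''.join(out)
-- ===== Notes on version B (the rewrite author's own statement) =====
-- stated objective: alternative
-- what changed: Replaced A's index-based scanner that jumps with str.find and appends slices by a single-pass character-at-a-time finite state machine (states for code, pending slash, single/triple strings, escapes, line/block comments) that emits one output character per input character.
import Mathlib
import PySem

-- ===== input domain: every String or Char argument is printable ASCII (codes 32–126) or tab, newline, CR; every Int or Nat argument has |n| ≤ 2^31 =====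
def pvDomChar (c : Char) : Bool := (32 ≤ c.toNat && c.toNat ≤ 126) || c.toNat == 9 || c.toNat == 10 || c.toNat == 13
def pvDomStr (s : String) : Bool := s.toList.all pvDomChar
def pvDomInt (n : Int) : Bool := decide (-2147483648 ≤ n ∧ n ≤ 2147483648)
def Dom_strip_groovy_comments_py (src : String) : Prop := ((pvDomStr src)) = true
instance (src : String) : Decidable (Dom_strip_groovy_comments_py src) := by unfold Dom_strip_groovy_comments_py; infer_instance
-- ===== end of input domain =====

-- B replaces A's str.find/slice jumping scanner by a one-character-at-a-time state machine (alternative decomposition, same cost).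

-- ===== PORT A =====
-- A's inner j-loop of the single-line-string branch: number of characters of
-- src[i+1:] consumed (backslash with a following char skips two; the quote closes).
def pyScan (q : Char) : List Char → Nat
  | [] => 0
  | c :: cs =>
    if c = '\\' ∧ cs ≠ [] then 2 + pyScan q cs.tail
    else if c = q then 1
    else 1 + pyScan q cs
  termination_by l => l.length
  decreasing_by
  · simp [List.length_tail]
  · simp

-- A's while-loop over src, expressed on the remaining suffix src[i:]
-- (every branch computes the same values: the same find calls, slice lengths and space counts).
def pyA : List Char → List Char
  | [] => []
  | c :: rest =>
    if (c = '\'' ∨ c = '"') ∧ rest.head? = some c ∧ rest.tail.head? = some c then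
      -- triple-quoted string: end = src.find(quote, i+3)
      let e := PySem.Chars.find rest.tail.tail [c, c, c]
      if e = -1 then c :: rest
      else (c :: rest).take (e.toNat + 6) ++ pyA ((c :: rest).drop (e.toNat + 6))
    else if c = '\'' ∨ c = '"' then
      let j := 1 + pyScan c rest
      (c :: rest).take j ++ pyA ((c :: rest).drop j)
    else if hsl : c = '/' ∧ rest.head? = some '/' then
      -- line comment: j = src.find("\n", i)
      let e := PySem.Chars.find (c :: rest) ['\n']
      let j := if e = -1 then (c :: rest).length else e.toNat
      List.replicate j ' ' ++ pyA ((c :: rest).drop j)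
    else if c = '/' ∧ rest.head? = some '*' then
      -- block comment: j = src.find("*/", i+2)
      let e := PySem.Chars.find rest.tail ['*', '/']
      if e = -1 then List.replicate (c :: rest).length ' '
      else List.replicate (e.toNat + 4) ' ' ++ pyA ((c :: rest).drop (e.toNat + 4))
    else c :: pyA rest
  termination_by l => l.length
  decreasing_by
  · simp
  · simp
  · have h1 := PySem.Chars.neg_one_le_find (s := c :: rest) (sub := ['\n'])
    simp only [List.length_drop, List.length_cons]
    split
    · omega
    · rename_i hne
      have h0 : (PySem.Chars.find (c :: rest) ['\n']).toNat ≠ 0 := by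
        intro h
        have hnn : (0:Int) ≤ PySem.Chars.find (c :: rest) ['\n'] := by omega
        have hs := PySem.Chars.find_spec (s := c :: rest) (sub := ['\n']) hnn
        rw [h] at hs
        simp at hs
        exact absurd hs (by simp [hsl.1])
      omega
  · simp
  · simp

def strip_groovy_comments_py (src : String) : String := String.ofList (pyA src.toList)

-- ===== PORT B =====
-- B's states (mirrors Source B's NORM/SLASH/Q1/INSTR/ESC/Q2/TRIPLE/LINE/BLK).
inductive BSt : Type
  | norm | slash
  | q1 : Char → BSt | instr : Char → BSt | esc : Char → BSt | q2 : Char → BSt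
  | triple : Char → Nat → BSt
  | line | blk : Bool → BSt
deriving DecidableEq, Repr

-- Source B's norm_char
def bNorm (c : Char) : BSt × List Char :=
  if c = '\'' ∨ c = '"' then (.q1 c, [c])
  else if c = '/' then (.slash, [])
  else (.norm, [c])

-- one iteration of Source B's for-loop: next state and the characters appended
def bStep : BSt → Char → BSt × List Char
  | .norm, c => bNorm c
  | .slash, c =>
    if c = '/' then (.line, [' ', ' '])
    else if c = '*' then (.blk false, [' ', ' '])
    else ((bNorm c).1, '/' :: (bNorm c).2)
  | .q1 q, c =>
    if c = q then (.q2 q, [c])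
    else if c = '\\' then (.esc q, [c])
    else (.instr q, [c])
  | .instr q, c =>
    if c = q then (.norm, [c])
    else if c = '\\' then (.esc q, [c])
    else (.instr q, [c])
  | .esc q, c => (.instr q, [c])
  | .q2 q, c =>
    if c = q then (.triple q 0, [c])
    else bNorm c
  | .triple q k, c =>
    if c = q then (if k = 2 then (.norm, [c]) else (.triple q (k + 1), [c]))
    else (.triple q 0, [c])
  | .line, c => if c = '\n' then (.norm, ['\n']) else (.line, [' '])
  | .blk star, c =>
    if star ∧ c = '/' then (.norm, [' '])
    else (.blk (c = '*'), [' '])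

-- Source B's trailing flush after the loop
def bFlush : BSt → List Char
  | .slash => ['/']
  | _ => []

def bRun : BSt → List Char → List Char
  | st, [] => bFlush st
  | st, c :: cs => (bStep st c).2 ++ bRun (bStep st c).1 cs

def strip_groovy_comments_py_alt (src : String) : String := String.ofList (bRun .norm src.toList)

-- ===== PRECONDITION & SPEC =====
def Spec_strip_groovy_comments_py (src : String) (out : String) : Prop := out = strip_groovy_comments_py_alt src
instance (src : String) (out : String) : Decidable (Spec_strip_groovy_comments_py src out) := by unfold Spec_strip_groovy_comments_py; infer_instance

-- ===== CLAIM (what is proved, stated in full; the proofs are below) =====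
def Claim_equal_strip_groovy_comments_py : Prop := ∀ (src : String), Dom_strip_groovy_comments_py src → Spec_strip_groovy_comments_py src (strip_groovy_comments_py src)

-- ===== LEMMAS AND PROOFS =====

-- first index of an occurrence of `sub`, by peeling one character at a time
def ffind (sub : List Char) : List Char → Option Nat
  | [] => none
  | c :: cs => if sub <+: (c :: cs) then some 0 else (ffind sub cs).map (· + 1)

theorem ffind_none {sub : List Char} (h : sub ≠ []) :
    ∀ l : List Char, ffind sub l = none ↔ ∀ i, ¬ sub <+: l.drop i := by
  intro l
  induction l with
  | nil => simp [ffind, List.prefix_nil, h]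
  | cons c cs ih =>
    simp only [ffind]
    split
    · rename_i hp
      constructor
      · intro hc; exact absurd hc (by simp)
      · intro hall; exact absurd (hall 0) (by simpa using hp)
    · rename_i hp
      rw [Option.map_eq_none_iff, ih]
      constructor
      · intro hall i
        cases i with
        | zero => simpa using hp
        | succ j => simpa using hall j
      · intro hall i
        simpa using hall (i + 1)

theorem ffind_some {sub : List Char} :
    ∀ {l : List Char} {k : Nat}, ffind sub l = some k →
      sub <+: l.drop k ∧ ∀ i < k, ¬ sub <+: l.drop i := by
  intro l
  induction l with
  | nil => intro k h; simp [ffind] at h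
  | cons c cs ih =>
    intro k h
    simp only [ffind] at h
    split at h
    · rename_i hp
      cases h
      exact ⟨by simpa using hp, by omega⟩
    · rename_i hp
      rw [Option.map_eq_some_iff] at h
      obtain ⟨m, hm, rfl⟩ := h
      have := ih hm
      refine ⟨by simpa using this.1, ?_⟩
      intro i hi
      cases i with
      | zero => simpa using hp
      | succ j => simpa using this.2 j (by omega)

theorem ffind_eq_find {sub l : List Char} (hsub : sub ≠ []) :
    PySem.Chars.find l sub = match ffind sub l with | none => -1 | some k => (k : Int) := by
  cases h : ffind sub l with
  | none =>
    simp only []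
    rw [PySem.Chars.find_eq_neg_one_iff]
    intro hinf
    have : PySem.Chars.isIn sub l = true := (PySem.Chars.isIn_iff_infix _ _).mpr hinf
    obtain ⟨j, hj⟩ := (PySem.Chars.exists_prefix_drop_iff_isIn (s := l) (sub := sub)).mpr this
    exact (ffind_none hsub l).mp h j hj
  | some k =>
    have hk := ffind_some h
    have hinf : sub <:+: l := by
      rw [← PySem.Chars.isIn_iff_infix, ← PySem.Chars.exists_prefix_drop_iff_isIn]
      exact ⟨k, hk.1⟩
    have h0 : 0 ≤ PySem.Chars.find l sub := (PySem.Chars.find_nonneg_iff _ _).mpr hinf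
    have hs := PySem.Chars.find_spec (s := l) (sub := sub) h0
    have htn : (PySem.Chars.find l sub).toNat = k := by
      rcases lt_trichotomy (PySem.Chars.find l sub).toNat k with hlt | he | hgt
      · exact absurd hs.1 (hk.2 _ hlt)
      · exact he
      · exact absurd hk.1 (hs.2 _ hgt)
    simp only []
    omega

theorem ffind_short {sub : List Char} :
    ∀ {l : List Char}, l.length < sub.length → ffind sub l = none := by
  intro l
  induction l with
  | nil => intro _; rfl
  | cons c cs ih =>
    intro hlen
    simp only [ffind]
    rw [if_neg, ih (by simp at hlen ⊢; omega), Option.map_none]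
    intro hp
    have := hp.length_le
    simp at this hlen
    omega

-- ===== DFA-mode characterizations =====

theorem bStep_q1_ne {q c : Char} (h : c ≠ q) : bStep (.q1 q) c = bStep (.instr q) c := by
  simp [bStep, h]

theorem bRun_instr {q : Char} (hq : q ≠ '\\') :
    ∀ (n : Nat) (l : List Char), l.length ≤ n →
      bRun (.instr q) l = l.take (pyScan q l) ++ bRun .norm (l.drop (pyScan q l)) := by
  intro n
  induction n with
  | zero =>
    intro l hl
    rw [Nat.le_zero, List.length_eq_zero_iff] at hl; subst hl
    rw [pyScan]; simp [bRun, bFlush]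
  | succ n ih =>
    intro l hl
    match l with
    | [] => rw [pyScan]; simp [bRun, bFlush]
    | c :: cs =>
      by_cases hc : c = q
      · subst hc
        rw [pyScan]
        rw [if_neg (by simp [hq])]
        simp [bRun, bStep]
      · by_cases hb : c = '\\' ∧ cs ≠ []
        · obtain ⟨rfl, hne⟩ := hb
          match cs with
          | d :: t =>
            rw [pyScan, if_pos ⟨rfl, by simp⟩]
            have : bRun (.instr q) ('\\' :: d :: t) = '\\' :: d :: bRun (.instr q) t := by
              simp [bRun, bStep, hc]
            rw [this, ih t (by simp at hl; omega)]
            simp only [List.tail_cons]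
            have h2 : 2 + pyScan q t = pyScan q t + 1 + 1 := by omega
            rw [h2, List.take_succ_cons, List.take_succ_cons, List.drop_succ_cons,
              List.drop_succ_cons]
            simp
        · rw [pyScan, if_neg hb, if_neg hc]
          by_cases hbs : c = '\\'
          · subst hbs
            have hcs : cs = [] := by
              by_contra hne; exact hb ⟨rfl, hne⟩
            subst hcs
            rw [pyScan]
            simp [bRun, bStep, bFlush, hc]
          · have hstep : bRun (.instr q) (c :: cs) = c :: bRun (.instr q) cs := by
              simp only [bRun, bStep]
              rw [if_neg hc, if_neg hbs]
              simp
            rw [hstep, ih cs (by simp at hl; omega)]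
            have h1 : 1 + pyScan q cs = pyScan q cs + 1 := by omega
            rw [h1, List.take_succ_cons, List.drop_succ_cons]
            simp

-- triple-quoted mode: characters consumed until (and including) the closing quote run
def tclose (q : Char) : Nat → List Char → Option Nat
  | _, [] => none
  | k, c :: cs =>
    if c = q then (if k = 2 then some 1 else (tclose q (k + 1) cs).map (· + 1))
    else (tclose q 0 cs).map (· + 1)

theorem bRun_triple (q : Char) :
    ∀ (l : List Char) (k : Nat),
      bRun (.triple q k) l =
        match tclose q k l with
        | none => l
        | some m => l.take m ++ bRun .norm (l.drop m) := by
  intro l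
  induction l with
  | nil => intro k; rfl
  | cons c cs ih =>
    intro k
    by_cases hc : c = q
    · subst hc
      by_cases hk : k = 2
      · subst hk
        simp [tclose, bRun, bStep]
      · have hb : bRun (.triple c k) (c :: cs) = c :: bRun (.triple c (k + 1)) cs := by
          simp [bRun, bStep, hk]
        rw [hb, ih (k + 1)]
        simp only [tclose, if_pos rfl, if_neg hk]
        cases h : tclose c (k + 1) cs <;> simp [h, List.take_succ_cons, List.drop_succ_cons]
    · have hb : bRun (.triple q k) (c :: cs) = c :: bRun (.triple q 0) cs := by
        simp [bRun, bStep, hc]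
      rw [hb, ih 0]
      simp only [tclose, if_neg hc]
      cases h : tclose q 0 cs <;> simp [h, List.take_succ_cons, List.drop_succ_cons]

theorem tclose_ffind (q : Char) :
    ∀ (l : List Char) (k : Nat), k ≤ 2 →
      tclose q k l = (ffind [q, q, q] (List.replicate k q ++ l)).map (fun e => e + 3 - k) := by
  intro l
  induction l with
  | nil =>
    intro k hk
    rw [ffind_short (by simp; omega)]
    rfl
  | cons c cs ih =>
    intro k hk
    by_cases hc : c = q
    · subst hc
      by_cases hk2 : k = 2
      · subst hk2
        have hrep : List.replicate 2 c ++ c :: cs = c :: c :: c :: cs := by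
          simp [List.replicate]
        rw [hrep, tclose, if_pos rfl, if_pos rfl, ffind]
        split
        · rfl
        · rename_i hnp; exact absurd ⟨cs, rfl⟩ hnp
      · have heq : List.replicate k c ++ c :: cs = List.replicate (k + 1) c ++ cs := by
          rw [List.replicate_succ']; simp
        rw [tclose, if_pos rfl, if_neg hk2, heq, ih (k + 1) (by omega)]
        cases h : ffind [c, c, c] (List.replicate (k + 1) c ++ cs) <;> simp [h] <;> omega
    · -- c ≠ q : no occurrence can start inside the leading replicate-run
      have hstep : ∀ xs : List Char, ¬ [q,q,q] <+: (c :: xs) := by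
        intro xs hp
        rw [List.cons_prefix_cons] at hp
        exact hc hp.1.symm
      have hstepq : ∀ xs : List Char, ¬ [q,q,q] <+: (q :: c :: xs) := by
        intro xs hp
        rw [List.cons_prefix_cons, List.cons_prefix_cons] at hp
        exact hc hp.2.1.symm
      have hstepqq : ∀ xs : List Char, ¬ [q,q,q] <+: (q :: q :: c :: xs) := by
        intro xs hp
        rw [List.cons_prefix_cons, List.cons_prefix_cons, List.cons_prefix_cons] at hp
        exact hc hp.2.2.1.symm
      rw [tclose, if_neg hc, ih 0 (by omega)]
      interval_cases k
      · simp only [List.replicate, List.nil_append]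
        rw [ffind, if_neg (hstep cs)]
        cases h : ffind [q, q, q] cs <;> simp [h]
      · simp only [List.replicate, List.append_nil, List.cons_append, List.nil_append]
        rw [ffind, if_neg (hstepq cs), ffind, if_neg (hstep cs)]
        cases h : ffind [q, q, q] cs <;> simp [h]
      · simp only [List.replicate, List.append_nil, List.cons_append, List.nil_append]
        rw [ffind, if_neg (hstepqq cs), ffind, if_neg (hstepq cs), ffind, if_neg (hstep cs)]
        cases h : ffind [q, q, q] cs <;> simp [h] <;> omega

theorem bRun_line :
    ∀ l : List Char,
      bRun .line l =
        match ffind ['\n'] l with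
        | none => List.replicate l.length ' '
        | some e => List.replicate e ' ' ++ '\n' :: bRun .norm (l.drop (e + 1)) := by
  intro l
  induction l with
  | nil => rfl
  | cons c cs ih =>
    by_cases hc : c = '\n'
    · subst hc
      have : ffind ['\n'] ('\n' :: cs) = some 0 := by
        rw [ffind, if_pos (by simp)]
      rw [this]
      simp [bRun, bStep]
    · have hb : bRun .line (c :: cs) = ' ' :: bRun .line cs := by
        simp [bRun, bStep, hc]
      rw [hb, ih, ffind, if_neg (by intro hp; rw [List.cons_prefix_cons] at hp; exact hc hp.1.symm)]
      cases h : ffind ['\n'] cs <;> simp [h, List.replicate_succ]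

-- block-comment mode: characters consumed until (and including) the closing */
def bclose : Bool → List Char → Option Nat
  | _, [] => none
  | star, c :: cs =>
    if star ∧ c = '/' then some 1 else (bclose (c = '*') cs).map (· + 1)

theorem bRun_blk :
    ∀ (l : List Char) (star : Bool),
      bRun (.blk star) l =
        match bclose star l with
        | none => List.replicate l.length ' '
        | some m => List.replicate m ' ' ++ bRun .norm (l.drop m) := by
  intro l
  induction l with
  | nil => intro star; rfl
  | cons c cs ih =>
    intro star
    by_cases h : star = true ∧ c = '/'
    · obtain ⟨rfl, rfl⟩ := h
      rw [bclose, if_pos (by simp)]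
      simp [bRun, bStep]
    · have hb : bRun (.blk star) (c :: cs) = ' ' :: bRun (.blk (c = '*')) cs := by
        simp only [bRun, bStep]
        rw [if_neg (by simpa using h)]
        simp
      have hcl : bclose star (c :: cs) = (bclose (c = '*') cs).map (· + 1) := by
        rw [bclose, if_neg (by simpa using h)]
      rw [hb, ih, hcl]
      cases hx : bclose (c = '*') cs <;> simp [hx, List.replicate_succ]

theorem bclose_ffind :
    ∀ (l : List Char) (star : Bool),
      bclose star l =
        (ffind ['*', '/'] (cond star ('*' :: l) l)).map (fun e => e + cond star 1 2) := by
  intro l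
  induction l with
  | nil =>
    intro star
    cases star
    · rfl
    · simp only [Bool.cond_true]
      rw [ffind, if_neg (by intro hp; have := hp.length_le; simp at this), ffind]
      rfl
  | cons c cs ih =>
    intro star
    have hihT := ih true
    have hihF := ih false
    simp only [Bool.cond_true, Bool.cond_false] at hihT hihF
    cases star
    · -- star = false
      by_cases hc : c = '*'
      · subst hc
        have h1 : bclose false ('*' :: cs) = (bclose true cs).map (· + 1) := by
          simp [bclose]
        rw [h1, hihT]
        simp only [Bool.cond_false]
        cases h : ffind ['*', '/'] ('*' :: cs) <;> simp [h]
      · have h1 : bclose false (c :: cs) = (bclose false cs).map (· + 1) := by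
          simp [bclose, hc]
        have h2 : ffind ['*', '/'] (c :: cs) = (ffind ['*', '/'] cs).map (· + 1) := by
          rw [ffind, if_neg (by intro hp; rw [List.cons_prefix_cons] at hp; exact hc hp.1.symm)]
        rw [h1, hihF]
        simp only [Bool.cond_false]
        rw [h2]
        cases h : ffind ['*', '/'] cs <;> simp [h]
    · -- star = true
      simp only [Bool.cond_true]
      by_cases hc : c = '/'
      · subst hc
        have h1 : bclose true ('/' :: cs) = some 1 := by simp [bclose]
        have h2 : ffind ['*', '/'] ('*' :: '/' :: cs) = some 0 := by
          rw [ffind, if_pos ⟨cs, rfl⟩]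
        rw [h1, h2]
        rfl
      · have h2 : ffind ['*', '/'] ('*' :: c :: cs) = (ffind ['*', '/'] (c :: cs)).map (· + 1) := by
          rw [ffind, if_neg (by
            intro hp; rw [List.cons_prefix_cons, List.cons_prefix_cons] at hp
            exact hc hp.2.1.symm)]
        by_cases hs : c = '*'
        · subst hs
          have h1 : bclose true ('*' :: cs) = (bclose true cs).map (· + 1) := by
            simp [bclose, hc]
          rw [h1, hihT, h2]
        · have h1 : bclose true (c :: cs) = (bclose false cs).map (· + 1) := by
            simp [bclose, hc, hs]
          have h3 : ffind ['*', '/'] (c :: cs) = (ffind ['*', '/'] cs).map (· + 1) := by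
            rw [ffind, if_neg (by intro hp; rw [List.cons_prefix_cons] at hp; exact hs hp.1.symm)]
          rw [h1, hihF, h2, h3]
          cases h : ffind ['*', '/'] cs <;> simp [h]

theorem pyA_nil : pyA [] = [] := by simp [pyA]

theorem pyA_other {c : Char} (hq : ¬(c = '\'' ∨ c = '"')) (hs : c ≠ '/') (xs : List Char) :
    pyA (c :: xs) = c :: pyA xs := by
  rw [pyA]
  rw [if_neg (by tauto), if_neg hq, dif_neg (by tauto), if_neg (by tauto)]

theorem pyA_slash_other {xs : List Char} (h1 : xs.head? ≠ some '/') (h2 : xs.head? ≠ some '*') :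
    pyA ('/' :: xs) = '/' :: pyA xs := by
  rw [pyA]
  rw [if_neg (by simp), if_neg (by simp), dif_neg (by tauto), if_neg (by tauto)]

theorem bRun_norm_cons (c : Char) (cs : List Char) :
    bRun .norm (c :: cs) = (bNorm c).2 ++ bRun (bNorm c).1 cs := rfl

theorem pyA_bRun_aux :
    ∀ (n : Nat) (l : List Char), l.length ≤ n → pyA l = bRun .norm l := by
  intro n
  induction n with
  | zero =>
    intro l hl
    rw [Nat.le_zero, List.length_eq_zero_iff] at hl; subst hl
    simp [pyA, bRun, bFlush]
  | succ n ih =>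
    intro l hl
    match l with
    | [] => simp [pyA, bRun, bFlush]
    | c :: rest =>
      have hrlen : rest.length ≤ n := by simp at hl; omega
      have ihd : ∀ m : Nat, pyA (rest.drop m) = bRun .norm (rest.drop m) := by
        intro m
        exact ih (rest.drop m) (by simp; omega)
      by_cases h1 : (c = '\'' ∨ c = '"') ∧ rest.head? = some c ∧ rest.tail.head? = some c
      · -- triple-quoted string
        obtain ⟨hq, hh1, hh2⟩ := h1
        obtain ⟨t, rfl⟩ : ∃ t, rest = c :: c :: t := by
          cases rest with
          | nil => simp at hh1
          | cons d rt =>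
            cases rt with
            | nil => simp at hh2
            | cons e t =>
              simp at hh1 hh2
              exact ⟨t, by rw [hh1, hh2]⟩
        have hB : bRun .norm (c :: c :: c :: t) = c :: c :: c :: bRun (.triple c 0) t := by
          simp [bRun, bStep, bNorm, hq]
        rw [hB, pyA, if_pos ⟨hq, by simp, by simp⟩]
        simp only [List.tail_cons]
        rw [ffind_eq_find (by simp)]
        rw [bRun_triple, tclose_ffind c t 0 (by omega)]
        simp only [List.replicate, List.nil_append]
        cases hf : ffind [c, c, c] t with
        | none => simp
        | some f =>
          simp only [Option.map_some]
          rw [if_neg (by simp)]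
          simp only [Int.toNat_natCast, Nat.sub_zero]
          have htake : List.take (f + 6) (c :: c :: c :: t) = c :: c :: c :: List.take (f + 3) t := by
            simp only [show f + 6 = f + 3 + 1 + 1 + 1 from by omega, List.take_succ_cons]
          have hdropl : List.drop (f + 6) (c :: c :: c :: t) = List.drop (f + 3) t := by
            simp only [show f + 6 = f + 3 + 1 + 1 + 1 from by omega, List.drop_succ_cons]
          rw [htake, hdropl, ih (t.drop (f + 3)) (by simp at hl ⊢; omega)]
          simp
      · by_cases h2 : c = '\'' ∨ c = '"'
        · -- single-line string
          have hcb : c ≠ '\\' := by rcases h2 with rfl | rfl <;> decide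
          have hB : bRun .norm (c :: rest) = c :: bRun (.q1 c) rest := by
            simp [bRun, bStep, bNorm, h2]
          rw [pyA, if_neg h1, if_pos h2, hB]
          match rest with
          | [] =>
            rw [pyScan]
            simp [bRun, bFlush, pyA_nil]
          | d :: t =>
            by_cases hdc : d = c
            · subst hdc
              have hth : t.head? ≠ some d := by
                intro hth
                exact h1 ⟨h2, by simp, by simpa using hth⟩
              rw [pyScan, if_neg (by simp [hcb]), if_pos rfl]
              simp only [show (1 + 1 : Nat) = 2 by rfl]
              match t with
              | [] =>
                simp [bRun, bStep, bFlush, pyA_nil]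
              | e :: t' =>
                have he : e ≠ d := by simpa using hth
                have hq2 : bRun (.q2 d) (e :: t') = bRun .norm (e :: t') := by
                  simp [bRun, bStep, he]
                have hq1 : bRun (.q1 d) (d :: e :: t') = d :: bRun (.q2 d) (e :: t') := by
                  simp [bRun, bStep]
                rw [hq1, hq2]
                have := ihd 1
                simp only [List.drop_succ_cons, List.drop_zero] at this
                simp [this]
            · have hq1 : bRun (.q1 c) (d :: t) = bRun (.instr c) (d :: t) := by
                rw [bRun, bRun, bStep_q1_ne hdc]
              rw [hq1, bRun_instr hcb n (d :: t) hrlen]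
              have := ihd (pyScan c (d :: t))
              rw [← this]
              simp only [show 1 + pyScan c (d :: t) = pyScan c (d :: t) + 1 from by omega,
                List.take_succ_cons, List.drop_succ_cons]
              simp
        · by_cases h3 : c = '/' ∧ rest.head? = some '/'
          · -- line comment
            obtain ⟨rfl, hh⟩ := h3
            obtain ⟨t, rfl⟩ : ∃ t, rest = '/' :: t := by
              cases rest with
              | nil => simp at hh
              | cons d t =>
                simp at hh
                exact ⟨t, by rw [hh]⟩
            have hB : bRun .norm ('/' :: '/' :: t) = ' ' :: ' ' :: bRun .line t := by
              simp [bRun, bStep, bNorm]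
            rw [pyA, if_neg h1, if_neg h2, dif_pos ⟨rfl, by simp⟩, hB, bRun_line]
            rw [ffind_eq_find (by simp)]
            have hff : ffind ['\n'] ('/' :: '/' :: t) = (ffind ['\n'] t).map (· + 1 + 1) := by
              rw [ffind, if_neg (by intro hp; rw [List.cons_prefix_cons] at hp; simp at hp),
                ffind, if_neg (by intro hp; rw [List.cons_prefix_cons] at hp; simp at hp)]
              cases hx : ffind ['\n'] t <;> simp [hx]
            rw [hff]
            cases hf : ffind ['\n'] t with
            | none =>
              simp only [Option.map_none]
              simp [pyA_nil, List.replicate_succ, List.drop_length]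
            | some f =>
              simp only [Option.map_some]
              rw [if_neg (show ¬(((f + 1 + 1 : Nat) : Int) = -1) from by omega)]
              simp only [Int.toNat_natCast]
              have hdrop : t.drop f = '\n' :: t.drop (f + 1) := by
                obtain ⟨u, hu⟩ := (ffind_some hf).1
                have hu' : t.drop f = '\n' :: u := by simpa using hu.symm
                have : t.drop (f + 1) = u := by
                  have hdd : t.drop (f + 1) = (t.drop f).drop 1 := by
                    simp [List.drop_drop, Nat.add_comm]
                  rw [hdd, hu']
                  rfl
                rw [hu', this]
              have hdrop2 : List.drop (f + 1 + 1) ('/' :: '/' :: t) = List.drop f t := by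
                simp only [List.drop_succ_cons]
              rw [hdrop2, hdrop, pyA_other (by simp) (by simp),
                ih (t.drop (f + 1)) (by simp at hl ⊢; omega)]
              simp [List.replicate_succ]
          · by_cases h4 : c = '/' ∧ rest.head? = some '*'
            · -- block comment
              obtain ⟨rfl, hh⟩ := h4
              obtain ⟨t, rfl⟩ : ∃ t, rest = '*' :: t := by
                cases rest with
                | nil => simp at hh
                | cons d t =>
                  simp at hh
                  exact ⟨t, by rw [hh]⟩
              have hB : bRun .norm ('/' :: '*' :: t) = ' ' :: ' ' :: bRun (.blk false) t := by
                simp [bRun, bStep, bNorm]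
              rw [pyA, if_neg h1, if_neg h2, dif_neg (by simpa using h3), if_pos ⟨rfl, by simp⟩,
                hB, bRun_blk, bclose_ffind]
              simp only [List.tail_cons, Bool.cond_false]
              rw [ffind_eq_find (by simp)]
              cases hf : ffind ['*', '/'] t with
              | none => simp [List.replicate_succ]
              | some f =>
                simp only [Option.map_some]
                rw [if_neg (by simp)]
                simp only [Int.toNat_natCast]
                have hdrop2 : List.drop (f + 4) ('/' :: '*' :: t) = List.drop (f + 2) t := by
                  simp only [show f + 4 = f + 2 + 1 + 1 from by omega, List.drop_succ_cons]
                rw [hdrop2, ih (t.drop (f + 2)) (by simp at hl ⊢; omega)]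
                simp [show f + 4 = f + 2 + 1 + 1 from by omega, List.replicate_succ]
            · -- ordinary character (possibly a lone '/')
              by_cases hc : c = '/'
              · subst hc
                match rest with
                | [] =>
                  rw [pyA_slash_other (by simp) (by simp), pyA_nil]
                  rfl
                | d :: t =>
                  have hd1 : d ≠ '/' := by intro h; exact h3 ⟨rfl, by simp [h]⟩
                  have hd2 : d ≠ '*' := by intro h; exact h4 ⟨rfl, by simp [h]⟩
                  rw [pyA_slash_other (by simpa using hd1) (by simpa using hd2)]
                  have hB : bRun .norm ('/' :: d :: t) = '/' :: bRun .norm (d :: t) := by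
                    simp [bRun, bStep, bNorm, hd1, hd2]
                  rw [hB]
                  have := ihd 0
                  simp at this
                  rw [this]
              · rw [pyA_other h2 hc]
                have hB : bRun .norm (c :: rest) = c :: bRun .norm rest := by
                  simp only [bRun_norm_cons, bNorm]
                  rw [if_neg h2, if_neg hc]
                  simp
                rw [hB]
                have := ihd 0
                simp at this
                rw [this]

theorem pyA_bRun (l : List Char) : pyA l = bRun .norm l :=
  pyA_bRun_aux l.length l le_rfl

-- ===== VERDICT (by name: the statement is the Claim_ definition above) =====
theorem strip_groovy_comments_py_spec : Claim_equal_strip_groovy_comments_py := by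
  intro src _
  unfold Spec_strip_groovy_comments_py strip_groovy_comments_py strip_groovy_comments_py_alt
  rw [pyA_bRun]
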